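-- pv_equiv track=rewrite | github.com/nickaigi/automatic-dollop | arcade_solutions/is_mac48_address.py | is_mac48_address
-- ===== SOURCE A (Python) =====
-- import string
--
-- def is_mac48_address(s):
--     address = s.split('-')
--     if len(address) != 6:
--         return False
--
--     if len(s) != 17:  #!+ alternative is to check for len(grp) == 2
--         return False
--
--     for grp in address:
--         for ch in grp:
--             if ch not in string.hexdigits:
--                 return False
--     return True
-- ===== SOURCE B (Python) =====
-- def is_mac48_address(s):
--     # Recursive state-machine scan: walk the string once carrying a dash
--     # counter; a non-dash non-hex character rejects immediately, and at the
--     # end of the string the address is valid iff exactly 5 dashes were seen.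
--     # Length 17 is the only other requirement (it forces non-empty groups'
--     # total of 12 hex digits is NOT required by A, only total length).
--     if len(s) != 17:
--         return False
--
--     def scan(i, dashes):
--         if i == 17:
--             return dashes == 5
--         c = s[i]
--         if c == '-':
--             return scan(i + 1, dashes + 1)
--         if c in '0123456789abcdefABCDEF':
--             return scan(i + 1, dashes)
--         return False
--
--     return scan(0, 0)
-- ===== Notes on version B (the rewrite author's own statement) =====
-- stated objective: alternative
-- what changed: Replaced split-into-groups plus a nested per-group loop with a recursive single-pass state machine that scans characters once, carrying a dash counter, rejecting on the first bad character and checking dashes == 5 only at end of string.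
import Mathlib
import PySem

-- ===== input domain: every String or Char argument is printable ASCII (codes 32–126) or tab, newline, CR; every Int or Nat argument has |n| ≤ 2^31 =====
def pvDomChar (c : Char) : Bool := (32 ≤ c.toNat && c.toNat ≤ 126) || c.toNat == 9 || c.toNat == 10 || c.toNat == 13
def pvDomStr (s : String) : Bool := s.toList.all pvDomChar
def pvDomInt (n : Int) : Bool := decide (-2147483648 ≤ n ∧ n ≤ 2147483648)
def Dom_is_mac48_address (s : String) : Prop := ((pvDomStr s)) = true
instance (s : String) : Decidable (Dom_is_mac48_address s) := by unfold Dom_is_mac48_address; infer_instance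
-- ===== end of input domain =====

-- B replaces A's split-into-groups plus nested loop by a recursive single-pass
-- state machine carrying a dash counter; same O(n) cost, different decomposition.

-- string.hexdigits as a list of characters; 'ch in string.hexdigits' for a single
-- character ch is exactly membership in this list (exact on the ASCII domain).
def pvHexdigits : List Char := "0123456789abcdefABCDEF".toList

-- ===== PORT A =====
def is_mac48_address (s : String) : Bool :=
  let address := PySem.Chars.splitOn s.toList ['-']
  if address.length ≠ 6 then false
  else if PySem.Str.len s ≠ 17 then false
  else
    -- the nested for-loops with early 'return False'
    address.all (fun grp => grp.all (fun ch => pvHexdigits.contains ch))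

-- ===== PORT B =====
-- the recursive scan(i, dashes) of Source B: structural recursion over the
-- remaining characters with the dash counter as accumulator
def pvScan : List Char → Nat → Bool
  | [], dashes => dashes == 5
  | c :: rest, dashes =>
      if c = '-' then pvScan rest (dashes + 1)
      else if pvHexdigits.contains c then pvScan rest dashes
      else false

def is_mac48_address_alt (s : String) : Bool :=
  if PySem.Str.len s ≠ 17 then false
  else pvScan s.toList 0

-- ===== PRECONDITION & SPEC =====
def Spec_is_mac48_address (s : String) (out : Bool) : Prop := out = is_mac48_address_alt s
instance (s : String) (out : Bool) : Decidable (Spec_is_mac48_address s out) := by unfold Spec_is_mac48_address; infer_instance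

-- ===== CLAIM (what is proved, stated in full; the proofs are below) =====
def Claim_equal_is_mac48_address : Prop := ∀ (s : String), Dom_is_mac48_address s → Spec_is_mac48_address s (is_mac48_address s)

-- ===== LEMMAS AND PROOFS =====

-- reference splitter for a single '-' separator
def pvSplitDash : List Char → List (List Char)
  | [] => [[]]
  | c :: rest => if c = '-' then [] :: pvSplitDash rest
                 else (pvSplitDash rest).modifyHead (c :: ·)

def pvPrependHead (p : List Char) : List (List Char) → List (List Char)
  | [] => [p]
  | g :: t => (p ++ g) :: t

theorem pvSplitDash_ne_nil (l : List Char) : pvSplitDash l ≠ [] := by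
  cases l with
  | nil => simp [pvSplitDash]
  | cons c rest =>
    simp only [pvSplitDash]
    split
    · simp
    · cases h : pvSplitDash rest with
      | nil => exact absurd h (pvSplitDash_ne_nil rest)
      | cons g t => simp [List.modifyHead]

theorem pvPrependHead_nil (gs : List (List Char)) (h : gs ≠ []) :
    pvPrependHead [] gs = gs := by
  cases gs with
  | nil => exact absurd rfl h
  | cons g t => simp [pvPrependHead]

theorem pvGo_eq (l : List Char) : ∀ (f : Nat) (cur : List Char) (acc : List (List Char)),
    l.length ≤ f →
    PySem.Chars.splitOn.go ['-'] (f + 1) l cur acc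
      = acc.reverse ++ pvPrependHead cur.reverse (pvSplitDash l) := by
  induction l with
  | nil =>
    intro f cur acc _
    simp [PySem.Chars.splitOn.go, pvSplitDash, pvPrependHead]
  | cons c rest ih =>
    intro f cur acc hf
    obtain ⟨f', rfl⟩ : ∃ f', f = f' + 1 := by
      cases f with
      | zero => simp at hf
      | succ n => exact ⟨n, rfl⟩
    have hrest : rest.length ≤ f' := by simpa using hf
    by_cases hc : c = '-'
    · subst hc
      have hpre : List.isPrefixOf ['-'] ('-' :: rest) = true := by
        simp [List.isPrefixOf]
      rw [show ((f' + 1) + 1) = Nat.succ (f' + 1) from rfl]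
      simp only [PySem.Chars.splitOn.go, hpre]
      rw [show List.drop (['-'] : List Char).length ('-' :: rest) = rest by simp]
      rw [ih (f') [] (List.reverse cur :: acc) hrest]
      simp only [pvSplitDash, List.reverse_cons, List.reverse_nil,
        List.append_assoc]
      rw [pvPrependHead_nil _ (pvSplitDash_ne_nil rest)]
      cases hsd : pvSplitDash rest with
      | nil => exact absurd hsd (pvSplitDash_ne_nil rest)
      | cons g t => simp [pvPrependHead]
    · have hpre : List.isPrefixOf ['-'] (c :: rest) = false := by
        simp [List.isPrefixOf]
        intro h; exact absurd h.symm hc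
      rw [show ((f' + 1) + 1) = Nat.succ (f' + 1) from rfl]
      simp only [PySem.Chars.splitOn.go, hpre]
      rw [if_neg (by simp)]
      rw [ih (f') (c :: cur) acc hrest]
      congr 1
      simp only [pvSplitDash, if_neg hc, List.reverse_cons]
      cases h : pvSplitDash rest with
      | nil => exact absurd h (pvSplitDash_ne_nil rest)
      | cons g t => simp [pvPrependHead, List.modifyHead]

theorem pvSplitOn_dash (cs : List Char) :
    PySem.Chars.splitOn cs ['-'] = pvSplitDash cs := by
  show PySem.Chars.splitOn.go ['-'] (cs.length + 1) cs [] [] = _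
  rw [pvGo_eq cs cs.length [] [] (le_refl _)]
  simp [pvPrependHead_nil _ (pvSplitDash_ne_nil cs)]

theorem pvSplitDash_length (l : List Char) :
    (pvSplitDash l).length = l.count '-' + 1 := by
  induction l with
  | nil => simp [pvSplitDash]
  | cons c rest ih =>
    by_cases hc : c = '-'
    · subst hc; simp [pvSplitDash, ih]
    · simp [pvSplitDash, hc, ih]

theorem pvSplitDash_all (l : List Char) :
    (pvSplitDash l).all (fun grp => grp.all (fun ch => pvHexdigits.contains ch))
      = l.all (fun c => c == '-' || pvHexdigits.contains c) := by
  induction l with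
  | nil => simp [pvSplitDash]
  | cons c rest ih =>
    by_cases hc : c = '-'
    · subst hc; simpa [pvSplitDash] using ih
    · simp only [pvSplitDash, if_neg hc]
      cases h : pvSplitDash rest with
      | nil => exact absurd h (pvSplitDash_ne_nil rest)
      | cons g t =>
        rw [h] at ih
        simp only [List.modifyHead, List.all_cons]
        rw [show (c == '-') = false from by simp [hc], Bool.false_or, ← ih, Bool.and_assoc, List.all_cons]

-- the scanner computes: every char is dash-or-hex, and the total dash count is 5
theorem pvScan_eq (l : List Char) : ∀ (d : Nat),
    pvScan l d = (l.all (fun c => c == '-' || pvHexdigits.contains c)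
      && (d + l.count '-' == 5)) := by
  induction l with
  | nil => intro d; simp [pvScan]
  | cons c rest ih =>
    intro d
    by_cases hc : c = '-'
    · subst hc
      simp only [pvScan, ih, List.all_cons, List.count_cons_self,
        BEq.rfl, Bool.true_or, Bool.true_and]
      rw [show d + 1 + List.count '-' rest = d + (List.count '-' rest + 1) from by omega]
      simp
    · simp only [pvScan, if_neg hc, List.all_cons,
        show (c == '-') = false from by simp [hc], Bool.false_or]
      by_cases hh : pvHexdigits.contains c
      · rw [if_pos hh, ih, List.count_cons_of_ne (by simpa using hc)]
        simp only [hh, Bool.true_and]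
      · rw [if_neg hh]
        simp only [List.contains_eq_mem] at hh
        simp [hh]

-- ===== VERDICT (by name: the statement is the Claim_ definition above) =====
theorem is_mac48_address_spec : Claim_equal_is_mac48_address := by
  intro s _
  unfold Spec_is_mac48_address
  unfold is_mac48_address is_mac48_address_alt
  simp only [pvSplitOn_dash, pvSplitDash_length, pvSplitDash_all, pvScan_eq, Nat.zero_add]
  by_cases h5 : s.toList.count '-' = 5
  · simp [h5]
  · have h6 : s.toList.count '-' + 1 ≠ 6 := by omega
    simp [h5, h6]
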